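-- pv_equiv track=rewrite | github.com/MrAliTheGreat/DesignAlgorithms | Divide&Conquer/1.py | get_happiness
-- ===== SOURCE A (Python) =====
-- def get_happiness(line , size_line):
-- 	i = 0
-- 	happiness_to_left = [0] * size_line
-- 	temp = {}
-- 	while(i < size_line):
-- 		if(line[i] in temp.keys()):
-- 			temp[line[i]] += 1
-- 		else:
-- 			temp[line[i]] = 1
--
-- 		happiness_to_left[i] = temp[line[i]]
-- 		i += 1
--
-- 	temp.clear()
-- 	i -= 1
--
-- 	happiness_to_right = [0] * size_line
--
-- 	while(i >= 0):
-- 		if(line[i] in temp.keys()):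
-- 			temp[line[i]] += 1
-- 		else:
-- 			temp[line[i]] = 1
-- 		happiness_to_right[i] = temp[line[i]]
-- 		i -= 1
--
-- 	return happiness_to_left , happiness_to_right
-- ===== SOURCE B (Python) =====
-- def get_happiness(line, size_line):
--     count = {}
--     happiness_to_left = []
--     for i in range(size_line):
--         c = count.get(line[i], 0) + 1
--         count[line[i]] = c
--         happiness_to_left.append(c)
--     # count now holds the total occurrences over line[0..size_line-1]:
--     # suffix count at i = total - prefix count at i + 1
--     happiness_to_right = [count[line[i]] - happiness_to_left[i] + 1
--                           for i in range(size_line)]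
--     return happiness_to_left, happiness_to_right
-- ===== Notes on version B (the rewrite author's own statement) =====
-- stated objective: alternative
-- what changed: B replaces A's second backward re-counting loop by the arithmetic identity suffix_count = total_count - prefix_count + 1, reusing the dict left over from the single forward counting pass (which appends instead of writing into a preallocated list).
import Mathlib
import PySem

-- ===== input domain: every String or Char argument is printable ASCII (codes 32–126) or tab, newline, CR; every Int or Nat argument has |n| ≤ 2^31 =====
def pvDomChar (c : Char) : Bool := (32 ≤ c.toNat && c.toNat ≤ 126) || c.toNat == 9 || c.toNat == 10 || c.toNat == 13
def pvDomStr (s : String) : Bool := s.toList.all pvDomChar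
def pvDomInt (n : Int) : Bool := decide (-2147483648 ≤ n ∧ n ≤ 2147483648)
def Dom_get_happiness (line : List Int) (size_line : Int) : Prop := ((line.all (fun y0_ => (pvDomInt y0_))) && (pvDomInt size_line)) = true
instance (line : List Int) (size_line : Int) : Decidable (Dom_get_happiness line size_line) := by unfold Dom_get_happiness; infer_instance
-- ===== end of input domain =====

-- B replaces A's backward re-counting pass by suffix = total - prefix + 1 computed from the
-- forward pass's dict (objective: alternative decomposition, same cost).


-- ===== PORT A =====
-- while(i < size_line): count line[i] into temp, write the running count into left[i]
-- (line[i] is PySem.List.pyGet?; Pre_ guarantees it is `some`, so `.getD 0` is never the default)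
def aLoop1 (line : List Int) (size_line i : Int) (temp : PySem.Dict Int Int) (left : List Int) :
    PySem.Dict Int Int × List Int :=
  if h : i < size_line then
    let x := (PySem.List.pyGet? line i).getD 0
    let temp' := if temp.contains x then temp.insert x (temp.getD x 0 + 1) else temp.insert x 1
    aLoop1 line size_line (i + 1) temp' (left.set i.toNat (temp'.getD x 0))
  else (temp, left)
  termination_by (size_line - i).toNat
  decreasing_by omega

-- while(i >= 0): count line[i] into temp, write the running count into right[i]
def aLoop2 (line : List Int) (i : Int) (temp : PySem.Dict Int Int) (right : List Int) :
    PySem.Dict Int Int × List Int :=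
  if h : 0 ≤ i then
    let x := (PySem.List.pyGet? line i).getD 0
    let temp' := if temp.contains x then temp.insert x (temp.getD x 0 + 1) else temp.insert x 1
    aLoop2 line (i - 1) temp' (right.set i.toNat (temp'.getD x 0))
  else (temp, right)
  termination_by (i + 1).toNat
  decreasing_by omega

def get_happiness (line : List Int) (size_line : Int) : List Int × List Int :=
  let happiness_to_left := List.replicate size_line.toNat 0   -- [0] * size_line
  let s1 := aLoop1 line size_line 0 PySem.Dict.empty happiness_to_left
  -- temp.clear(); i -= 1 : the second loop starts at size_line - 1 with an empty dict
  let happiness_to_right := List.replicate size_line.toNat 0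
  let s2 := aLoop2 line (size_line - 1) PySem.Dict.empty happiness_to_right
  (s1.2, s2.2)

-- ===== PORT B =====
-- one forward step: bump the count of line[i] and append the new count to the left list
def bStep (line : List Int) (st : PySem.Dict Int Int × List Int) (i : Int) :
    PySem.Dict Int Int × List Int :=
  let x := (PySem.List.pyGet? line i).getD 0
  let c := st.1.getD x 0 + 1
  (st.1.insert x c, st.2 ++ [c])

-- happiness_to_right[i] = count[line[i]] - happiness_to_left[i] + 1
def bRight (line : List Int) (count : PySem.Dict Int Int) (left : List Int) (i : Int) : Int :=
  count.getD ((PySem.List.pyGet? line i).getD 0) 0 - (PySem.List.pyGet? left i).getD 0 + 1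

def get_happiness_alt (line : List Int) (size_line : Int) : List Int × List Int :=
  let st := (PySem.List.pyRange 0 size_line 1).foldl (bStep line) (PySem.Dict.empty, [])
  let happiness_to_right := (PySem.List.pyRange 0 size_line 1).map (bRight line st.1 st.2)
  (st.2, happiness_to_right)

-- ===== PRECONDITION & SPEC =====
-- Pre_ excludes exactly size_line > len(line), where A (and B alike) raise IndexError.
def Pre_get_happiness (line : List Int) (size_line : Int) : Prop := size_line ≤ (line.length : Int)
instance (line : List Int) (size_line : Int) : Decidable (Pre_get_happiness line size_line) := by
  unfold Pre_get_happiness; infer_instance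

def pvWitness_get_happiness : List Int × Int := ([2, 1, 2, 2, 1], 5)

def Spec_get_happiness (line : List Int) (size_line : Int) (out : List Int × List Int) : Prop := out = get_happiness_alt line size_line
instance (line : List Int) (size_line : Int) (out : List Int × List Int) : Decidable (Spec_get_happiness line size_line out) := by unfold Spec_get_happiness; infer_instance

-- ===== CLAIM (what is proved, stated in full; the proofs are below) =====
def Claim_equal_get_happiness : Prop := ∀ (line : List Int) (size_line : Int), Dom_get_happiness line size_line → Pre_get_happiness line size_line → Spec_get_happiness line size_line (get_happiness line size_line)

-- ===== LEMMAS AND PROOFS =====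

-- reference values: prefix running counts and suffix running counts of l
def prefL (l : List Int) : List Int := l.mapIdx (fun i x => ((l.take (i + 1)).count x : Int))
def sufR (l : List Int) : List Int := l.mapIdx (fun i x => ((l.drop i).count x : Int))

theorem length_prefL (l : List Int) : (prefL l).length = l.length := by simp [prefL]

theorem length_sufR (l : List Int) : (sufR l).length = l.length := by simp [sufR]

theorem getElem_prefL (l : List Int) (i : Nat) (h : i < l.length) :
    (prefL l)[i]'(by simpa [length_prefL] using h) = ((l.take (i + 1)).count l[i] : Int) := by
  simp [prefL]

theorem getElem_sufR (l : List Int) (i : Nat) (h : i < l.length) :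
    (sufR l)[i]'(by simpa [length_sufR] using h) = ((l.drop i).count l[i] : Int) := by
  simp [sufR]

-- the arithmetic identity behind B's second pass
theorem countIdent (l : List Int) (i : Nat) (h : i < l.length) :
    ((l.drop i).count l[i] : Int) = (l.count l[i] : Int) - ((l.take (i + 1)).count l[i] : Int) + 1 := by
  have h1 : l.count l[i] = (l.take (i + 1)).count l[i] + (l.drop (i + 1)).count l[i] := by
    rw [← List.count_append, List.take_append_drop]
  have h2 : l.drop i = l[i] :: l.drop (i + 1) := List.drop_eq_getElem_cons h
  have h3 : (l.drop i).count l[i] = (l.drop (i + 1)).count l[i] + 1 := by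
    rw [h2, List.count_cons_self]
  omega

-- prefix counts: splitting off the last processed element
theorem take_succ_of_lt {α : Type} (l : List α) (m : Nat) (h : m < l.length) :
    l.take (m + 1) = l.take m ++ [l[m]] := by
  exact List.take_succ_eq_append_getElem h

-- step for the count invariant: counts over take (k+1) from counts over take k
theorem count_take_succ (l : List Int) (k : Nat) (h : k < l.length) (y : Int) :
    (l.take (k + 1)).count y = (l.take k).count y + (if y = l[k] then 1 else 0) := by
  rw [take_succ_of_lt l k h, List.count_append, List.count_singleton]
  by_cases hy : y = l[k]
  · simp [hy]
  · simp [hy, Ne.symm hy]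

theorem count_cons_eq (l : List Int) (a b : Int) :
    (b :: l).count a = l.count a + (if a = b then 1 else 0) := by
  rw [List.count_cons]
  by_cases h : a = b
  · simp [h]
  · simp [h, Ne.symm h]

theorem aLoop1_spec (line : List Int) (n : Nat) (hn : n ≤ line.length) :
    ∀ (j k : Nat) (d : PySem.Dict Int Int), k ≤ n → n - k = j →
    (∀ x, d.getD x 0 = (((line.take n).take k).count x : Int)) →
    (aLoop1 line (n : Int) (k : Int) d
      ((prefL (line.take n)).take k ++ List.replicate (n - k) 0)).2 = prefL (line.take n) := by
  intro j
  induction j with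
  | zero =>
    intro k d hk hj hd
    have hkn : k = n := by omega
    rw [aLoop1]
    have : ¬ ((k : Int) < (n : Int)) := by omega
    simp only [dif_neg this]
    subst hkn
    simp only [Nat.sub_self, List.replicate_zero, List.append_nil]
    rw [List.take_of_length_le (by rw [length_prefL, List.length_take]; omega)]
  | succ j ih =>
    intro k d hk hj hd
    have hkn : k < n := by omega
    have hkl : k < line.length := by omega
    have hlen : (line.take n).length = n := by simp; omega
    have hkl' : k < (line.take n).length := by omega
    rw [aLoop1]
    have hcond : ((k : Int) < (n : Int)) := by omega
    simp only [dif_pos hcond]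
    -- the fetched element
    have hx : (PySem.List.pyGet? line (k : Int)).getD 0 = (line.take n)[k] := by
      rw [PySem.List.pyGet?_natCast]
      simp [List.getElem?_eq_getElem hkl, List.getElem_take]
    -- the updated dict in either branch
    set x := (PySem.List.pyGet? line (k : Int)).getD 0 with hxdef
    set temp' := if d.contains x then d.insert x (d.getD x 0 + 1) else d.insert x 1 with htemp'
    have hd' : ∀ y, temp'.getD y 0 = (((line.take n).take (k + 1)).count y : Int) := by
      intro y
      have hins : temp' = d.insert x (d.getD x 0 + 1) := by
        rw [htemp']
        by_cases hc : d.contains x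
        · simp [hc]
        · have h0 : d.getD x 0 = 0 := PySem.Dict.getD_of_not_contains _ _ (by simpa using hc)
          simp [hc, h0]
      rw [hins, PySem.Dict.getD_insert, hd y, hd x]
      rw [count_take_succ _ _ hkl' y, ← hx]
      split_ifs with hyx
      · rw [hyx]; push_cast; ring
      · push_cast; ring
    -- the list write appends the k-th prefix count
    have hc : temp'.getD x 0 = (prefL (line.take n))[k]'(by simpa [length_prefL] using hkl') := by
      rw [hd' x, getElem_prefL _ _ hkl', hx]
    have hset :
        (((prefL (line.take n)).take k ++ List.replicate (n - k) 0).set (k : Int).toNat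
          (temp'.getD x 0))
        = (prefL (line.take n)).take (k + 1) ++ List.replicate (n - (k + 1)) 0 := by
      have hlp : ((prefL (line.take n)).take k).length = k := by
        simp [length_prefL]; omega
      have hrep : List.replicate (n - k) (0 : Int) = 0 :: List.replicate (n - (k + 1)) 0 := by
        have : n - k = (n - (k + 1)) + 1 := by omega
        rw [this, List.replicate_succ]
      rw [hrep, Int.toNat_natCast, List.set_append_right _ _ (le_of_eq hlp), hlp,
        Nat.sub_self, List.set_cons_zero]
      rw [take_succ_of_lt _ _ (by simpa [length_prefL] using hkl'), hc]
      simp only [List.append_assoc, List.cons_append, List.nil_append]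
    rw [hset]
    have : (k : Int) + 1 = ((k + 1 : Nat) : Int) := by push_cast; ring
    rw [this]
    exact ih (k + 1) temp' (by omega) (by omega) hd' 

theorem aLoop2_spec (line : List Int) (n : Nat) (hn : n ≤ line.length) :
    ∀ (k : Nat) (d : PySem.Dict Int Int), k ≤ n →
    (∀ x, d.getD x 0 = (((line.take n).drop k).count x : Int)) →
    (aLoop2 line ((k : Int) - 1) d
      (List.replicate k 0 ++ (sufR (line.take n)).drop k)).2 = sufR (line.take n) := by
  intro k
  induction k with
  | zero =>
    intro d hk hd
    rw [aLoop2]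
    simp
  | succ k ih =>
    intro d hk hd
    have hkn : k < n := by omega
    have hkl : k < line.length := by omega
    have hlen : (line.take n).length = n := by simp; omega
    have hkl' : k < (line.take n).length := by omega
    have hi : ((k + 1 : Nat) : Int) - 1 = (k : Int) := by push_cast; ring
    rw [hi, aLoop2]
    have hcond : (0 : Int) ≤ (k : Int) := by omega
    simp only [dif_pos hcond]
    have hx : (PySem.List.pyGet? line (k : Int)).getD 0 = (line.take n)[k] := by
      rw [PySem.List.pyGet?_natCast]
      simp [List.getElem?_eq_getElem hkl, List.getElem_take]
    set x := (PySem.List.pyGet? line (k : Int)).getD 0 with hxdef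
    set temp' := if d.contains x then d.insert x (d.getD x 0 + 1) else d.insert x 1 with htemp'
    have hdrop : (line.take n).drop k = (line.take n)[k] :: (line.take n).drop (k + 1) :=
      List.drop_eq_getElem_cons hkl'
    have hd' : ∀ y, temp'.getD y 0 = (((line.take n).drop k).count y : Int) := by
      intro y
      have hins : temp' = d.insert x (d.getD x 0 + 1) := by
        rw [htemp']
        by_cases hc : d.contains x
        · simp [hc]
        · have h0 : d.getD x 0 = 0 := PySem.Dict.getD_of_not_contains _ _ (by simpa using hc)
          simp [hc, h0]
      rw [hins, PySem.Dict.getD_insert, hd y, hd x]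
      rw [hdrop, ← hx, count_cons_eq]
      split_ifs with hyx
      · rw [hyx]; push_cast; ring
      · push_cast; ring
    have hc : temp'.getD x 0 = (sufR (line.take n))[k]'(by simpa [length_sufR] using hkl') := by
      rw [hd' x, getElem_sufR _ _ hkl', hx]
    have hset :
        ((List.replicate (k + 1) 0 ++ (sufR (line.take n)).drop (k + 1)).set (k : Int).toNat
          (temp'.getD x 0))
        = List.replicate k 0 ++ (sufR (line.take n)).drop k := by
      have hrep : List.replicate (k + 1) (0 : Int) = List.replicate k 0 ++ [0] := by
        rw [← List.replicate_succ']
      have hlr : (List.replicate k (0 : Int)).length = k := by simp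
      rw [hrep, List.append_assoc, Int.toNat_natCast,
        List.set_append_right _ _ (le_of_eq hlr), hlr, Nat.sub_self, List.cons_append,
        List.set_cons_zero]
      have hsd : (sufR (line.take n)).drop k
          = (sufR (line.take n))[k]'(by simpa [length_sufR] using hkl')
            :: (sufR (line.take n)).drop (k + 1) :=
        List.drop_eq_getElem_cons (by simpa [length_sufR] using hkl')
      rw [hsd, hc]
      simp only [List.nil_append]
    rw [hset]
    exact ih temp' (by omega) hd'

theorem bFold_spec (line : List Int) (n : Nat) (hn : n ≤ line.length) :
    ∀ (m : Nat), m ≤ n →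
    ((List.range m).map (fun (k : Nat) => (k : Int))).foldl (bStep line) (PySem.Dict.empty, [])
      = (((line.take n).take m).foldl (fun d x => d.insert x (d.getD x 0 + 1)) PySem.Dict.empty,
         (prefL (line.take n)).take m) := by
  intro m
  induction m with
  | zero => intro _; simp
  | succ m ih =>
    intro hm
    have hml : m < line.length := by omega
    have hlen : (line.take n).length = n := by simp; omega
    have hml' : m < (line.take n).length := by omega
    rw [List.range_succ, List.map_append, List.foldl_append, ih (by omega)]
    have hx : (PySem.List.pyGet? line (m : Int)).getD 0 = (line.take n)[m] := by
      rw [PySem.List.pyGet?_natCast]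
      simp [List.getElem?_eq_getElem hml, List.getElem_take]
    simp only [List.map_cons, List.map_nil, List.foldl_cons, List.foldl_nil, bStep, hx]
    rw [take_succ_of_lt _ _ hml', List.foldl_append]
    simp only [Prod.mk.injEq]
    constructor
    · simp
    · rw [take_succ_of_lt (prefL (line.take n)) m (by simpa [length_prefL] using hml'),
        getElem_prefL _ _ hml']
      have hcnt : ((line.take n).take (m + 1)).count (line.take n)[m]
          = ((line.take n).take m).count (line.take n)[m] + 1 := by
        rw [count_take_succ _ _ hml']
        simp
      congr 2
      rw [hcnt, PySem.Dict.getD_foldl_insert_add_one, PySem.Dict.getD_empty]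
      push_cast
      ring

theorem get_happiness_spec : Claim_equal_get_happiness := by
  intro line size_line _hdom hpre
  unfold Spec_get_happiness
  by_cases hs : size_line ≤ 0
  · -- empty case: both loops do nothing, both results are ([], [])
    have ht : size_line.toNat = 0 := by omega
    rw [get_happiness, get_happiness_alt]
    rw [PySem.List.pyRange_one_eq_nil (by omega)]
    rw [aLoop1, aLoop2]
    have h1 : ¬ ((0 : Int) < size_line) := by omega
    have h2 : ¬ ((1 : Int) ≤ size_line) := by omega
    simp [h1, h2, ht]
  · -- main case: size_line = n > 0
    obtain ⟨n, hsz⟩ : ∃ n : Nat, size_line = (n : Int) := ⟨size_line.toNat, by omega⟩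
    subst hsz
    have hn : n ≤ line.length := by
      unfold Pre_get_happiness at hpre
      omega
    have hlen : (line.take n).length = n := by simp; omega
    -- A's first loop
    have hA1 : (aLoop1 line (n : Int) 0 PySem.Dict.empty (List.replicate n 0)).2
        = prefL (line.take n) := by
      have := aLoop1_spec line n hn n 0 PySem.Dict.empty (by omega) (by omega)
        (by intro x; simp)
      simpa using this
    -- A's second loop
    have hA2 : (aLoop2 line ((n : Int) - 1) PySem.Dict.empty (List.replicate n 0)).2
        = sufR (line.take n) := by
      have hd : ∀ x, (PySem.Dict.empty : PySem.Dict Int Int).getD x 0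
          = (((line.take n).drop n).count x : Int) := by
        intro x; simp [List.drop_of_length_le (le_of_eq hlen)]
      have := aLoop2_spec line n hn n PySem.Dict.empty (le_refl n) hd
      rw [List.drop_of_length_le (le_of_eq (by rw [length_sufR, hlen]))] at this
      simpa using this
    -- B's fold
    have hp : (prefL (line.take n)).take n = prefL (line.take n) :=
      List.take_of_length_le (le_of_eq (by rw [length_prefL, hlen]))
    have ht2 : (line.take n).take n = line.take n := by
      rw [List.take_take, Nat.min_self]
    have hfold : (PySem.List.pyRange 0 (n : Int) 1).foldl (bStep line) (PySem.Dict.empty, [])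
        = ((line.take n).foldl (fun d x => d.insert x (d.getD x 0 + 1)) PySem.Dict.empty,
           prefL (line.take n)) := by
      rw [PySem.List.pyRange_one]
      have h0 : ((n : Int) - 0).toNat = n := by omega
      rw [h0]
      have hb := bFold_spec line n hn n (le_refl n)
      rw [ht2, hp] at hb
      simpa only [zero_add] using hb
    -- B's right pass equals the suffix counts
    have hB2 : (PySem.List.pyRange 0 (n : Int) 1).map
        (bRight line ((line.take n).foldl (fun d x => d.insert x (d.getD x 0 + 1))
          PySem.Dict.empty) (prefL (line.take n)))
        = sufR (line.take n) := by
      rw [PySem.List.pyRange_one]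
      have h0 : ((n : Int) - 0).toNat = n := by omega
      rw [h0, List.map_map]
      apply List.ext_getElem
      · simp [length_sufR, hlen]
      · intro i hi hi'
        have hin : i < n := by simpa using hi
        have hil : i < line.length := by omega
        have hil' : i < (line.take n).length := by omega
        simp only [List.getElem_map, List.getElem_range, Function.comp_apply]
        rw [getElem_sufR _ _ hil']
        unfold bRight
        have hx : (PySem.List.pyGet? line ((0 : Int) + (i : Int))).getD 0 = (line.take n)[i] := by
          rw [zero_add, PySem.List.pyGet?_natCast]
          simp [List.getElem?_eq_getElem hil, List.getElem_take]
        have hpi : (PySem.List.pyGet? (prefL (line.take n)) ((0 : Int) + (i : Int))).getD 0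
            = (((line.take n).take (i + 1)).count (line.take n)[i] : Int) := by
          rw [zero_add, PySem.List.pyGet?_natCast]
          rw [List.getElem?_eq_getElem (by simpa [length_prefL] using hil')]
          simp [getElem_prefL _ _ hil']
        rw [hx, hpi, PySem.Dict.getD_foldl_insert_add_one]
        simp only [PySem.Dict.getD_empty, zero_add]
        rw [countIdent _ _ hil']
    rw [get_happiness, get_happiness_alt]
    simp only [Int.toNat_natCast, hfold]
    rw [hA1, hA2, hB2]
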